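-- pv_equiv track=rewrite | github.com/David-5-5/tutorial | python/algo/leecode/algo2430.py | deleteString1
-- ===== SOURCE A (Python) =====
-- from functools import lru_cache
--
-- def deleteString1(s: str) -> int:
--     '''
--     RecursionError: maximum recursion depth exceeded on local
--     !!!! OVERTIME !!!!
--     '''
--     @lru_cache(maxsize = None)
--     def deleteStr(s) -> int:
--         n = len(s)
--         maxStep = 1
--         if n == 1: return 1
--         for i in range(n // 2):
--             if s[0:i+1] == s[i+1:2*(i+1)]:
--                 maxStep = max(maxStep, 1 + deleteStr(s[i+1:]))
--
--         return maxStep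
--
--     return deleteStr(s)
-- ===== SOURCE B (Python) =====
-- def deleteString1(s: str) -> int:
--     # Bottom-up DP over suffix indices with an O(n) rolling LCP row for O(1)
--     # prefix-equality tests: O(n^2) total instead of A's memoized recursion
--     # over suffix strings with O(n) slice comparisons.
--     n = len(s)
--     prev = [0] * (n + 1)        # lcp row for suffix index n (all zeros)
--     dp = [1]                    # dp[j] for j = n..n (empty suffix: one step)
--     for i in range(n - 1, -1, -1):
--         # cur[j] = length of longest common prefix of s[i:] and s[j:]
--         cur = [prev[j + 1] + 1 if s[i] == s[j] else 0 for j in range(n)] + [0]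
--         best = 1
--         for l in range(1, (n - i) // 2 + 1):
--             if cur[i + l] >= l:
--                 best = max(best, 1 + dp[l - 1])   # dp[l-1] is dp value at index i+l
--         dp = [best] + dp
--         prev = cur
--     return dp[0]
-- ===== Notes on version B (the rewrite author's own statement) =====
-- stated objective: faster
-- what changed: Replaced A's top-down memoized recursion over suffix strings (hashing/slicing O(n) strings inside an O(n^2) loop, O(n^3) overall) by a bottom-up DP over suffix indices with a rolling LCP row giving O(1) prefix-equality tests, O(n^2) overall.
import Mathlib
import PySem

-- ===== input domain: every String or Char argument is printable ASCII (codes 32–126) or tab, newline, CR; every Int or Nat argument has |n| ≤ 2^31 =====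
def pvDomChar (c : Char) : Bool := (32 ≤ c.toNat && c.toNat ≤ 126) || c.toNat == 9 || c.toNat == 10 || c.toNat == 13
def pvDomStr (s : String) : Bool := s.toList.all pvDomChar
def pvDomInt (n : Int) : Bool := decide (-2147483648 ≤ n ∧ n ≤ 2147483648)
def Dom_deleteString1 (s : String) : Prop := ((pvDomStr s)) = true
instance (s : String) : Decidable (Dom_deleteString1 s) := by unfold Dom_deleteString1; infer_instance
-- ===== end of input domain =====

-- B replaces A's memoized recursion over suffix strings (with O(n) slice comparisons)
-- by a bottom-up DP over suffix indices with a rolling LCP row; exact same return value.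

-- ===== PORT A =====
-- deleteStr, ported on List Char. The slices s[0:i+1], s[i+1:2*(i+1)], s[i+1:]
-- have non-negative bounds with start ≤ len, so they are exactly take/drop
-- (Python clamps the end index, as List.take does). lru_cache changes only speed.
def deleteString1A (l : List Char) : Int :=
  let n := l.length
  if n = 1 then 1
  else
    (List.range (n / 2)).attach.foldl
      (fun acc i =>
        if l.take (i.1 + 1) = (l.drop (i.1 + 1)).take (i.1 + 1)
        then max acc (1 + deleteString1A (l.drop (i.1 + 1)))
        else acc) 1
termination_by l.length
decreasing_by
  have hi := List.mem_range.mp i.2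
  simp only [List.length_drop]
  omega

def deleteString1 (s : String) : Int := deleteString1A s.toList

-- ===== PORT B =====
-- bGo cs n k performs the last k iterations of Source B's main loop (rows i = n-1 … n-k),
-- returning (cur, dp) after iteration i = n - k: cur is the current LCP row
-- (values are non-negative, kept as Nat) and dp the list [dp[i], …, dp[n]]
-- (so Source B's dp[l-1] is dp-value at absolute index i+l, as in Source B's comment).
def deleteString1B (cs : List Char) (n : Nat) : Nat → List Nat × List Int
  | 0 => (List.replicate (n + 1) 0, [1])
  | k + 1 =>
    let p := deleteString1B cs n k
    let i := n - (k + 1)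
    let cur := ((List.range n).map (fun j =>
        if cs.getD i ' ' = cs.getD j ' ' then p.1.getD (j + 1) 0 + 1 else 0)) ++ [0]
    let best := (List.range' 1 ((n - i) / 2)).foldl
        (fun acc l => if l ≤ cur.getD (i + l) 0 then max acc (1 + p.2.getD (l - 1) 0) else acc) 1
    (cur, best :: p.2)

def deleteString1_alt (s : String) : Int :=
  (deleteString1B s.toList s.toList.length s.toList.length).2.getD 0 1

-- ===== PRECONDITION & SPEC =====
def Spec_deleteString1 (s : String) (out : Int) : Prop := out = deleteString1_alt s
instance (s : String) (out : Int) : Decidable (Spec_deleteString1 s out) := by unfold Spec_deleteString1; infer_instance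

-- ===== CLAIM (what is proved, stated in full; the proofs are below) =====
def Claim_equal_deleteString1 : Prop := ∀ (s : String), Dom_deleteString1 s → Spec_deleteString1 s (deleteString1 s)

-- ===== LEMMAS AND PROOFS =====

-- lcpSpec cs i j = longest common prefix length of the suffixes cs[i:], cs[j:]
def lcpSpec (cs : List Char) (i j : Nat) : Nat :=
  if hi : i < cs.length then
    if hj : j < cs.length then
      if cs[i] = cs[j] then lcpSpec cs (i + 1) (j + 1) + 1 else 0
    else 0
  else 0
termination_by cs.length - i
decreasing_by omega

lemma lcpSpec_step (cs : List Char) (i j : Nat) (hi : i < cs.length) (hj : j < cs.length) :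
    lcpSpec cs i j = if cs[i] = cs[j] then lcpSpec cs (i + 1) (j + 1) + 1 else 0 := by
  rw [lcpSpec, dif_pos hi, dif_pos hj]

lemma lcpSpec_of_ge (cs : List Char) (i j : Nat) (h : cs.length ≤ i ∨ cs.length ≤ j) :
    lcpSpec cs i j = 0 := by
  rw [lcpSpec]
  split_ifs with h1 h2 h3 <;> first | rfl | omega

lemma lcpSpec_ge_iff (cs : List Char) (l : Nat) : ∀ i j : Nat, i + l ≤ cs.length → j + l ≤ cs.length →
    (l ≤ lcpSpec cs i j ↔ (cs.drop i).take l = (cs.drop j).take l) := by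
  induction l with
  | zero => intro i j _ _; simp
  | succ l ih =>
    intro i j hi hj
    have hi' : i < cs.length := by omega
    have hj' : j < cs.length := by omega
    rw [← List.getElem_cons_drop hi', ← List.getElem_cons_drop hj']
    rw [List.take_succ_cons, List.take_succ_cons]
    rw [lcpSpec_step cs i j hi' hj']
    by_cases hc : cs[i] = cs[j]
    · rw [if_pos hc, List.cons_eq_cons]
      constructor
      · intro h
        exact ⟨hc, (ih (i + 1) (j + 1) (by omega) (by omega)).mp (by omega)⟩
      · intro h
        have := (ih (i + 1) (j + 1) (by omega) (by omega)).mpr h.2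
        omega
    · rw [if_neg hc]
      simp [hc]

lemma deleteString1A_nil : deleteString1A [] = 1 := by
  rw [deleteString1A]; simp

-- deleteString1A's loop with the membership wrapper (attach) removed
lemma deleteString1A_eq (l : List Char) :
    deleteString1A l = if l.length = 1 then 1 else
      (List.range (l.length / 2)).foldl
        (fun acc i => if l.take (i + 1) = (l.drop (i + 1)).take (i + 1)
          then max acc (1 + deleteString1A (l.drop (i + 1))) else acc) 1 := by
  rw [deleteString1A]
  have h := List.foldl_attach (l := List.range (l.length / 2))
    (f := fun (acc : Int) (i : Nat) => if l.take (i + 1) = (l.drop (i + 1)).take (i + 1)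
      then max acc (1 + deleteString1A (l.drop (i + 1))) else acc) (b := 1)
  rw [h]

-- shift a foldl over range'(1, m+1) to a foldl over range(m)
lemma foldl_range'_shift (m : Nat) (f g : Int → Nat → Int)
    (h : ∀ acc x, x < m → f acc (1 + x) = g acc x) :
    ∀ init : Int, (List.range' 1 m).foldl f init = (List.range m).foldl g init := by
  induction m with
  | zero => intro init; rfl
  | succ m ih =>
    intro init
    rw [List.range'_1_concat, List.range_succ, List.foldl_append, List.foldl_append]
    rw [ih (fun acc x hx => h acc x (by omega)) init]
    simp only [List.foldl_cons, List.foldl_nil]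
    exact h _ m (by omega)

-- Source B's inner loop (on the exact LCP row / dp tail) computes deleteString1A of the suffix
lemma best_eq (cs : List Char) (i : Nat) (hi : i < cs.length) :
    (List.range' 1 ((cs.length - i) / 2)).foldl
      (fun acc l => if l ≤ ((List.range (cs.length + 1)).map (fun j => lcpSpec cs i j)).getD (i + l) 0
        then max acc (1 + ((List.range' (i + 1) (cs.length - i)).map
              (fun j => deleteString1A (cs.drop j))).getD (l - 1) 0)
        else acc) 1
    = deleteString1A (cs.drop i) := by
  rw [deleteString1A_eq]
  simp only [List.length_drop]
  have hfold := foldl_range'_shift ((cs.length - i) / 2)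
    (fun acc l => if l ≤ ((List.range (cs.length + 1)).map (fun j => lcpSpec cs i j)).getD (i + l) 0
      then max acc (1 + ((List.range' (i + 1) (cs.length - i)).map
            (fun j => deleteString1A (cs.drop j))).getD (l - 1) 0)
      else acc)
    (fun acc x => if (cs.drop i).take (x + 1) = ((cs.drop i).drop (x + 1)).take (x + 1)
      then max acc (1 + deleteString1A ((cs.drop i).drop (x + 1))) else acc)
    (by
      intro acc x hx'
      simp only
      have hlm : 2 * (1 + x) ≤ cs.length - i := by omega
      have hcurget : ((List.range (cs.length + 1)).map (fun j => lcpSpec cs i j)).getD (i + (1 + x)) 0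
          = lcpSpec cs i (i + (1 + x)) :=
        PySem.List.getD_map_range _ (cs.length + 1) (i + (1 + x)) 0 (by omega)
      have hcond : ((1 + x) ≤ lcpSpec cs i (i + (1 + x)))
          ↔ ((cs.drop i).take (x + 1) = ((cs.drop i).drop (x + 1)).take (x + 1)) := by
        rw [List.drop_drop, show x + 1 = 1 + x by omega]
        exact lcpSpec_ge_iff cs (1 + x) i (i + (1 + x)) (by omega) (by omega)
      have hval : ((List.range' (i + 1) (cs.length - i)).map
            (fun j => deleteString1A (cs.drop j))).getD (1 + x - 1) 0
          = deleteString1A ((cs.drop i).drop (x + 1)) := by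
        rw [List.getD_eq_getElem _ _ (by simp; omega), List.getElem_map, List.getElem_range',
          List.drop_drop]
        congr 2
        omega
      rw [hcurget, hval]
      by_cases hc : (cs.drop i).take (x + 1) = ((cs.drop i).drop (x + 1)).take (x + 1)
      · rw [if_pos hc, if_pos (hcond.mpr hc)]
      · rw [if_neg hc, if_neg (fun h => hc (hcond.mp h))])
    1
  by_cases hone : cs.length - i = 1
  · rw [if_pos hone, hfold, hone]
    rfl
  · rw [if_neg hone]
    exact hfold

-- the invariant of Source B's main loop after k iterations (i = n - k):
-- row = LCP row for index i, dp = [deleteString1A(cs[j:]) for j = i … n]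
lemma deleteString1B_inv (cs : List Char) (k : Nat) (hk : k ≤ cs.length) :
    (deleteString1B cs cs.length k).1
      = (List.range (cs.length + 1)).map (fun j => lcpSpec cs (cs.length - k) j) ∧
    (deleteString1B cs cs.length k).2
      = (List.range' (cs.length - k) (k + 1)).map (fun j => deleteString1A (cs.drop j)) := by
  induction k with
  | zero =>
    rw [deleteString1B]
    constructor
    · symm
      rw [List.eq_replicate_iff]
      refine ⟨by simp, ?_⟩
      intro b hb
      simp only [List.mem_map, List.mem_range] at hb
      obtain ⟨j, _, hj⟩ := hb
      rw [← hj, lcpSpec_of_ge]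
      omega
    · simp [List.range'_one, List.drop_length, deleteString1A_nil]
  | succ k ih =>
    have ih := ih (by omega)
    have hilt : cs.length - (k + 1) < cs.length := by omega
    have hi1 : cs.length - k = (cs.length - (k + 1)) + 1 := by omega
    rw [deleteString1B]
    simp only
    have hrow : ((List.range cs.length).map (fun j =>
        if cs.getD (cs.length - (k + 1)) ' ' = cs.getD j ' '
        then (deleteString1B cs cs.length k).1.getD (j + 1) 0 + 1 else 0)) ++ [0]
        = (List.range (cs.length + 1)).map (fun j => lcpSpec cs (cs.length - (k + 1)) j) := by
      rw [List.range_succ, List.map_append]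
      congr 1
      · apply List.map_eq_map_iff.mpr
        intro j hj
        have hjn : j < cs.length := List.mem_range.mp hj
        rw [ih.1, PySem.List.getD_map_range _ (cs.length + 1) (j + 1) 0 (by omega),
          List.getD_eq_getElem _ _ hilt, List.getD_eq_getElem _ _ hjn,
          lcpSpec_step cs _ j hilt hjn, hi1]
      · simp [lcpSpec_of_ge cs (cs.length - (k + 1)) cs.length (by omega)]
    refine ⟨hrow, ?_⟩
    have hrange : List.range' (cs.length - k) (k + 1)
        = List.range' ((cs.length - (k + 1)) + 1) (cs.length - (cs.length - (k + 1))) := by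
      congr 1
      omega
    rw [show List.range' (cs.length - (k + 1)) (k + 1 + 1)
        = (cs.length - (k + 1)) :: List.range' ((cs.length - (k + 1)) + 1) (k + 1)
        from List.range'_succ, List.map_cons]
    congr 1
    · rw [hrow, ih.2, hrange]
      exact best_eq cs (cs.length - (k + 1)) hilt
    · rw [show cs.length - (k + 1) + 1 = cs.length - k from by omega]
      exact ih.2

lemma deleteString1_eq (s : String) : deleteString1 s = deleteString1_alt s := by
  unfold deleteString1 deleteString1_alt
  have h := (deleteString1B_inv s.toList s.toList.length (le_refl _)).2
  rw [h, List.getD_eq_getElem _ _ (by simp), List.getElem_map, List.getElem_range']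
  simp

-- ===== VERDICT (by name: the statement is the Claim_ definition above) =====
theorem deleteString1_spec : Claim_equal_deleteString1 := by
  intro s _
  unfold Spec_deleteString1
  exact deleteString1_eq s
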